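-- pv_equiv track=rewrite | github.com/grigorevmp/DiffrentProjects2 | Networks/heming/task1.py | deleteControlBits
-- ===== SOURCE A (Python) =====
-- def deleteControlBits(code_word):
--     """
--     :param code_word: current string
--     :return: string with deleted control bits
--     """
--     degree = 0
--     informational_word = ""
--     code_word_len = len(code_word)
--     for i in range(code_word_len):
--         if i + 1 == 2 ** degree:
--             degree += 1
--         else:
--             informational_word += code_word[i]
--     return informational_word
-- ===== SOURCE B (Python) =====
-- def deleteControlBits(code_word):
--     # Concatenate the contiguous segments between control positions:
--     # 1-indexed non-powers-of-two are exactly the 0-indexed slices [2**k, 2**(k+1)-1).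
--     parts = []
--     n = len(code_word)
--     k = 1
--     while 2 ** k < n:
--         parts.append(code_word[2 ** k : 2 ** (k + 1) - 1])
--         k += 1
--     return "".join(parts)
-- ===== Notes on version B (the rewrite author's own statement) =====
-- stated objective: faster
-- what changed: Instead of scanning every character and tracking a power-of-two counter to skip control positions, B builds the result as a join of the contiguous kept slices between consecutive powers of two, looping k = 1, 2, ... while 2**k < len(code_word).
import Mathlib
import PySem

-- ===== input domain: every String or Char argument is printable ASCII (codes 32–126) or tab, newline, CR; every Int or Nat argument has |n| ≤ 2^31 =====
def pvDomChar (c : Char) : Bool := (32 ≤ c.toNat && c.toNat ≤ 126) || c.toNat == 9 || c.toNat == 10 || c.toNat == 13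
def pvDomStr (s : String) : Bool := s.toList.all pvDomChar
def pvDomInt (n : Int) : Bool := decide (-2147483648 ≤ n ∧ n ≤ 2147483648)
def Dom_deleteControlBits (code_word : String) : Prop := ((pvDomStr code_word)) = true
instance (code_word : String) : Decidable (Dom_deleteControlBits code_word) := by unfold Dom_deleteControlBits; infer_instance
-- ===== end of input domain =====

-- B rebuilds the word as a join of the contiguous kept slices [2^k, 2^(k+1)-1) instead of
-- A's per-character scan with a degree counter; same output, alternative algorithm.

-- ===== PORT A =====
-- the for-loop over range(len) with state (degree, informational_word), as structural recursion on the index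
def loopA (xs : List Char) (i degree : Nat) (acc : List Char) : List Char :=
  if h : i < xs.length then
    if i + 1 = 2 ^ degree then loopA xs (i + 1) (degree + 1) acc
    else loopA xs (i + 1) degree (acc ++ [xs[i]])
  else acc
termination_by xs.length - i

def deleteControlBits (code_word : String) : String :=
  String.mk (loopA code_word.toList 0 0 [])

-- ===== PORT B =====
-- the while-loop over k collecting the slices code_word[2**k : 2**(k+1)-1]
def loopB (xs : List Char) (k : Nat) (parts : List (List Char)) : List (List Char) :=
  if 2 ^ k < xs.length then
    loopB xs (k + 1)
      (parts ++ [PySem.List.slice xs (some ((2 ^ k : Nat) : Int)) (some ((2 ^ (k + 1) - 1 : Nat) : Int))])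
  else parts
termination_by xs.length - 2 ^ k
decreasing_by
  have : 2 ^ k < 2 ^ (k + 1) := Nat.pow_lt_pow_succ (by norm_num)
  omega

def deleteControlBits_alt (code_word : String) : String :=
  String.mk (loopB code_word.toList 1 []).flatten

-- ===== PRECONDITION & SPEC =====
def Spec_deleteControlBits (code_word : String) (out : String) : Prop := out = deleteControlBits_alt code_word
instance (code_word : String) (out : String) : Decidable (Spec_deleteControlBits code_word out) := by unfold Spec_deleteControlBits; infer_instance

-- ===== CLAIM (what is proved, stated in full; the proofs are below) =====
def Claim_equal_deleteControlBits : Prop := ∀ (code_word : String), Dom_deleteControlBits code_word → Spec_deleteControlBits code_word (deleteControlBits code_word)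

-- ===== LEMMAS AND PROOFS =====

theorem loopA_stop (xs : List Char) (i degree : Nat) (acc : List Char)
    (h : ¬ i < xs.length) : loopA xs i degree acc = acc := by
  rw [loopA]; simp [h]

theorem loopB_stop (xs : List Char) (k : Nat) (parts : List (List Char))
    (h : ¬ 2 ^ k < xs.length) : loopB xs k parts = parts := by
  rw [loopB]; simp [h]

theorem loopB_step (xs : List Char) (k : Nat) (parts : List (List Char))
    (h : 2 ^ k < xs.length) :
    loopB xs k parts = loopB xs (k + 1)
      (parts ++ [PySem.List.slice xs (some ((2 ^ k : Nat) : Int)) (some ((2 ^ (k + 1) - 1 : Nat) : Int))]) := by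
  conv_lhs => rw [loopB]
  rw [if_pos h]

-- a run of indices strictly below the next control position 2^d - 1 just copies characters
theorem runA (xs : List Char) : ∀ (m i d : Nat) (acc : List Char), i + m + 1 = 2 ^ d →
    loopA xs i d acc = loopA xs (2 ^ d - 1) d (acc ++ (xs.drop i).take m) := by
  intro m
  induction m with
  | zero =>
    intro i d acc h
    have : 2 ^ d - 1 = i := by omega
    simp [this]
  | succ m ih =>
    intro i d acc h
    rw [loopA]
    by_cases hl : i < xs.length
    · have hne : ¬ (i + 1 = 2 ^ d) := by omega
      simp only [dif_pos hl, if_neg hne]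
      have hdrop : xs.drop i = xs[i] :: xs.drop (i + 1) := List.drop_eq_getElem_cons hl
      rw [ih (i + 1) d (acc ++ [xs[i]]) (by omega), hdrop, List.take_succ_cons]
      simp
    · simp only [dif_neg hl]
      rw [loopA_stop xs (2 ^ d - 1) d _ (by omega)]
      rw [List.drop_eq_nil_of_le (by omega)]
      simp

theorem loopB_acc (xs : List Char) : ∀ (n k : Nat) (parts : List (List Char)),
    xs.length - 2 ^ k ≤ n → loopB xs k parts = parts ++ loopB xs k [] := by
  intro n
  induction n with
  | zero =>
    intro k parts h
    have hc : ¬ 2 ^ k < xs.length := by omega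
    rw [loopB_stop xs k parts hc, loopB_stop xs k [] hc]
    simp
  | succ n ih =>
    intro k parts h
    by_cases hc : 2 ^ k < xs.length
    · have hp : 2 ^ k < 2 ^ (k + 1) := Nat.pow_lt_pow_succ (by norm_num)
      rw [loopB_step xs k parts hc, loopB_step xs k [] hc]
      rw [ih (k + 1)
        (parts ++ [PySem.List.slice xs (some ((2 ^ k : Nat) : Int)) (some ((2 ^ (k + 1) - 1 : Nat) : Int))])
        (by omega)]
      rw [ih (k + 1)
        ([] ++ [PySem.List.slice xs (some ((2 ^ k : Nat) : Int)) (some ((2 ^ (k + 1) - 1 : Nat) : Int))])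
        (by omega)]
      simp
    · rw [loopB_stop xs k parts hc, loopB_stop xs k [] hc]
      simp

theorem mainAB (xs : List Char) : ∀ (fuel : Nat), ∀ (d : Nat) (acc : List Char), 1 ≤ d →
    xs.length ≤ 2 ^ d - 1 + fuel →
    loopA xs (2 ^ d - 1) d acc = acc ++ (loopB xs d []).flatten := by
  intro fuel
  induction fuel with
  | zero =>
    intro d acc hd hn
    have h1 : 1 ≤ 2 ^ d := Nat.one_le_two_pow
    rw [loopA_stop xs _ _ _ (by omega), loopB_stop xs d [] (by omega)]
    simp
  | succ fuel ih =>
    intro d acc hd hn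
    have h2d : 2 ≤ 2 ^ d := by
      calc 2 = 2 ^ 1 := by norm_num
        _ ≤ 2 ^ d := Nat.pow_le_pow_right (by norm_num) hd
    have hsucc : 2 ^ (d + 1) = 2 ^ d + 2 ^ d := by rw [Nat.pow_succ]; omega
    by_cases h1 : 2 ^ d - 1 < xs.length
    · rw [loopA]
      simp only [dif_pos h1, if_pos (by omega : 2 ^ d - 1 + 1 = 2 ^ d)]
      rw [show 2 ^ d - 1 + 1 = 2 ^ d from by omega]
      rw [runA xs (2 ^ d - 1) (2 ^ d) (d + 1) acc (by omega)]
      rw [ih (d + 1) _ (by omega) (by omega)]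
      by_cases hc : 2 ^ d < xs.length
      · rw [loopB_step xs d [] hc, PySem.List.slice_natCast]
        have h2 : 2 ^ (d + 1) - 1 - 2 ^ d = 2 ^ d - 1 := by omega
        rw [h2]
        rw [loopB_acc xs xs.length (d + 1)
          ([] ++ [List.take (2 ^ d - 1) (List.drop (2 ^ d) xs)]) (by omega)]
        simp
      · -- 2^d = xs.length: the copied segment and the remaining loop are both empty
        rw [loopB_stop xs d [] hc]
        rw [List.drop_eq_nil_of_le (by omega)]
        rw [loopB_stop xs (d + 1) [] (by omega)]
        simp
    · rw [loopA_stop xs _ _ _ h1, loopB_stop xs d [] (by omega)]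
      simp

-- ===== VERDICT (by name: the statement is the Claim_ definition above) =====
theorem deleteControlBits_spec : Claim_equal_deleteControlBits := by
  intro cw _
  unfold Spec_deleteControlBits deleteControlBits deleteControlBits_alt
  set xs := cw.toList with hxs
  congr 1
  rw [loopA]
  by_cases h0 : 0 < xs.length
  · simp only [dif_pos h0, if_pos (by norm_num : 0 + 1 = 2 ^ 0)]
    have := mainAB xs xs.length 1 [] (le_refl 1) (by omega)
    simpa using this
  · rw [loopB_stop xs 1 [] (by omega)]
    simp [h0]
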